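-- pv_equiv track=rewrite | github.com/lh-gym/chatbot | tests/unit/test_chunker.py | _make_long_text
-- ===== SOURCE A (Python) =====
-- def _make_long_text(token_count: int = 2600) -> str:
--     sentence = "Data governance requires strict access control and encryption."
--     words = sentence.split()
--     repeated = []
--     while len(repeated) < token_count:
--         repeated.extend(words)
--     body = " ".join(repeated[:token_count])
--     return body + "\n\n" + body
-- ===== SOURCE B (Python) =====
-- def _make_long_text(token_count: int = 2600) -> str:
--     sentence = "Data governance requires strict access control and encryption."
--     words = sentence.split()
--     reps = token_count // len(words) + 1
--     body = " ".join((words * reps)[:token_count])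
--     return body + "\n\n" + body
-- ===== Notes on version B (the rewrite author's own statement) =====
-- stated objective: simpler
-- what changed: Replaces the while loop that grows the list word-block by word-block with a closed-form repetition count (token_count // len(words) + 1) and a single list multiplication before slicing and joining.
import Mathlib
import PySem

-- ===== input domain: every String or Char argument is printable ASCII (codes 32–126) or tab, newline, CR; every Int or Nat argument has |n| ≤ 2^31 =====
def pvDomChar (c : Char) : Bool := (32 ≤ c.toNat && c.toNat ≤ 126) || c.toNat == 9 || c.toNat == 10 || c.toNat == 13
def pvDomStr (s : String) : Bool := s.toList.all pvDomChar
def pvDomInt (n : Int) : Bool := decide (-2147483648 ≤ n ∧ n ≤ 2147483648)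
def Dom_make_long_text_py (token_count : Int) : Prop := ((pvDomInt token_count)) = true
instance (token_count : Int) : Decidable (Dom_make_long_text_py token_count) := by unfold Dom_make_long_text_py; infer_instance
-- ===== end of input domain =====

-- B replaces A's incremental while-extend loop by a closed-form repetition count
-- (token_count // len(words) + 1) and one list multiplication; objective: simpler.

-- ===== PORT A =====
def pvWordsA : List String :=
  PySem.Str.split₀ "Data governance requires strict access control and encryption."

theorem pvWordsA_len : pvWordsA.length = 8 := by decide

-- the while loop of A: extend `repeated` by `words` until len(repeated) >= token_count
def pvLoopA (token_count : Int) (repeated : List String) : List String :=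
  if (repeated.length : Int) < token_count then
    pvLoopA token_count (repeated ++ pvWordsA)
  else repeated
termination_by (token_count - repeated.length).toNat
decreasing_by
  simp only [List.length_append, pvWordsA_len]
  omega

def make_long_text_py (token_count : Int) : String :=
  let repeated := pvLoopA token_count []
  let body := PySem.Str.join " " (PySem.List.slice repeated none (some token_count))
  body ++ "\n\n" ++ body

-- ===== PORT B =====
def pvWordsB : List String :=
  PySem.Str.split₀ "Data governance requires strict access control and encryption."

-- Python list multiplication: words * reps  (empty for reps <= 0)
def pvListMul (xs : List String) (n : Int) : List String :=
  if n ≤ 0 then [] else (List.replicate n.toNat xs).flatten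

def make_long_text_py_alt (token_count : Int) : String :=
  let words := pvWordsB
  let reps := PySem.Int.floordiv token_count (words.length : Int) + 1
  let body := PySem.Str.join " "
    (PySem.List.slice (pvListMul words reps) none (some token_count))
  body ++ "\n\n" ++ body

-- ===== PRECONDITION & SPEC =====
def Spec_make_long_text_py (token_count : Int) (out : String) : Prop := out = make_long_text_py_alt token_count
instance (token_count : Int) (out : String) : Decidable (Spec_make_long_text_py token_count out) := by unfold Spec_make_long_text_py; infer_instance

-- ===== CLAIM (what is proved, stated in full; the proofs are below) =====
def Claim_equal_make_long_text_py : Prop := ∀ (token_count : Int), Dom_make_long_text_py token_count → Spec_make_long_text_py token_count (make_long_text_py token_count)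

-- ===== LEMMAS AND PROOFS =====

theorem pvWordsB_eq : pvWordsB = pvWordsA := rfl

theorem flatten_replicate_len {α : Type} (ws : List α) (k : Nat) :
    ((List.replicate k ws).flatten).length = k * ws.length := by
  induction k with
  | zero => simp
  | succ k ih => simp [List.replicate_succ, ih, Nat.succ_mul, Nat.add_comm]

theorem loopA_spec (token_count : Int) (rep : List String) :
    ∃ k : Nat, pvLoopA token_count rep = rep ++ (List.replicate k pvWordsA).flatten ∧
      token_count ≤ ((pvLoopA token_count rep).length : Int) := by
  induction rep using pvLoopA.induct token_count with
  | case1 rep h ih =>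
    obtain ⟨k, hk, hlen⟩ := ih
    refine ⟨k + 1, ?_, ?_⟩
    · rw [pvLoopA, if_pos h, hk, List.replicate_succ, List.flatten_cons, List.append_assoc]
    · rw [pvLoopA, if_pos h]; exact hlen
  | case2 rep h =>
    refine ⟨0, ?_, ?_⟩ <;> rw [pvLoopA, if_neg h]
    · simp
    · omega

-- two sufficiently long repetitions of the same block agree on any prefix they both cover
theorem take_flatten_replicate_le {α : Type} (ws : List α) (t k₁ k₂ : Nat)
    (hk : k₁ ≤ k₂) (h₁ : t ≤ k₁ * ws.length) :
    ((List.replicate k₁ ws).flatten).take t = ((List.replicate k₂ ws).flatten).take t := by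
  have hsplit : List.replicate k₂ ws = List.replicate k₁ ws ++ List.replicate (k₂ - k₁) ws := by
    rw [← List.replicate_add]; congr 1; omega
  rw [hsplit, List.flatten_append, List.take_append_of_le_length]
  rw [flatten_replicate_len]; exact h₁

theorem take_flatten_replicate {α : Type} (ws : List α) (t k₁ k₂ : Nat)
    (h₁ : t ≤ k₁ * ws.length) (h₂ : t ≤ k₂ * ws.length) :
    ((List.replicate k₁ ws).flatten).take t = ((List.replicate k₂ ws).flatten).take t := by
  rcases Nat.le_total k₁ k₂ with h | h
  · exact take_flatten_replicate_le ws t k₁ k₂ h h₁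
  · exact (take_flatten_replicate_le ws t k₂ k₁ h h₂).symm

theorem make_long_text_py_spec : Claim_equal_make_long_text_py := by
  unfold Claim_equal_make_long_text_py
  intro tc _
  unfold Spec_make_long_text_py make_long_text_py make_long_text_py_alt
  simp only [pvWordsB_eq, pvWordsA_len, Nat.cast_ofNat]
  have hbody : PySem.List.slice (pvLoopA tc []) none (some tc) =
      PySem.List.slice (pvListMul pvWordsA (PySem.Int.floordiv tc 8 + 1)) none (some tc) := by
    rcases lt_or_ge tc 0 with hneg | hpos
    · -- token_count < 0 : both lists are empty
      have hA : pvLoopA tc [] = [] := by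
        rw [pvLoopA, if_neg]; simp; omega
      have hfd : PySem.Int.floordiv tc 8 < 0 :=
        (PySem.Int.floordiv_lt_iff_lt_mul (by omega)).mpr (by omega)
      have hB : pvListMul pvWordsA (PySem.Int.floordiv tc 8 + 1) = [] := by
        rw [pvListMul, if_pos (by omega)]
      rw [hA, hB]
    · -- 0 ≤ token_count : both slices take tc.toNat of a long-enough repetition
      obtain ⟨k, hk, hlen⟩ := loopA_spec tc []
      simp only [List.nil_append] at hk
      have hfd : PySem.Int.floordiv tc 8 = tc / 8 :=
        PySem.Int.floordiv_eq_ediv_of_pos (by omega)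
      rw [hk, pvListMul, if_neg (by omega)]
      rw [PySem.List.slice_to, PySem.List.slice_to]
      apply take_flatten_replicate
      · rw [hk] at hlen
        have := flatten_replicate_len pvWordsA k
        rw [pvWordsA_len] at this ⊢
        omega
      · rw [pvWordsA_len]
        omega
      all_goals exact hpos
  rw [hbody]
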